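-- pv_equiv track=rewrite | github.com/gresaid/omgtu_labs | 2_semestr/algo_struct/set_7.py | max_peresech_size
-- ===== SOURCE A (Python) =====
-- def peresech(set1, set2):
--     if not set1 or not set2:
--         return set()
--     temp = {}
--     for x in set1:
--         temp[x] = True
--     res = []
--     for x in set2:
--         if x in temp:
--             res.append(x)
--     return set(res)
--
-- def max_peresech_size(sets):
--     mx = 0
--     for i in range(len(sets)):
--         for j in range(i + 1, len(sets)):
--             temp = peresech(sets[i], sets[j])
--             if len(temp) > mx:
--                 mx = len(temp)
--     return mx
-- ===== SOURCE B (Python) =====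
-- def max_peresech_size(sets):
--     # inverted index: element -> list of set-indices containing it (each once, increasing)
--     occ = {}
--     for i in range(len(sets)):
--         for x in dict.fromkeys(sets[i]):
--             occ.setdefault(x, []).append(i)
--     # each shared element contributes 1 to every unordered pair of its sets
--     pairs = []
--     for idxs in occ.values():
--         rest = list(idxs)
--         while rest:
--             x = rest.pop(0)
--             for y in rest:
--                 pairs.append((x, y))
--     counts = {}
--     for p in pairs:
--         counts[p] = counts.get(p, 0) + 1
--     best = 0
--     for v in counts.values():
--         if v > best:
--             best = v
--     return best
-- ===== Notes on version B (the rewrite author's own statement) =====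
-- stated objective: faster
-- what changed: Replaces the all-pairs intersection scan (a dict-based intersection per index pair) by an inverted index element->set-indices and a co-occurrence counter keyed by unordered index pairs, returning the maximum counter value (0 if none).
import Mathlib
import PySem

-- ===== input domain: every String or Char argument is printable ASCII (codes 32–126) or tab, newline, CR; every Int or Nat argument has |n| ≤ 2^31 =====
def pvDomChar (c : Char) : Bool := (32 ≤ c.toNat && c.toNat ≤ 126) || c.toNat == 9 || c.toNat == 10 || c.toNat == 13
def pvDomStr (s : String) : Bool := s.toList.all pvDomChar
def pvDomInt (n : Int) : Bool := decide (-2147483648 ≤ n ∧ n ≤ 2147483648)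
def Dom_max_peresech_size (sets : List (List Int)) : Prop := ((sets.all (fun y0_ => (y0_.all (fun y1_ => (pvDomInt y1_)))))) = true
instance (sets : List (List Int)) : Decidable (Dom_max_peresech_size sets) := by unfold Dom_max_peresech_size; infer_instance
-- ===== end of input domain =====

-- B replaces the pairwise intersection scan by an inverted index (element -> set indices)
-- and counts each unordered index pair once per shared element; equivalence of the return values is proved.

-- ===== PORT A =====
def peresech (set1 set2 : List Int) : PySem.Set Int :=
  if set1 = [] ∨ set2 = [] then PySem.Set.empty
  else
    let temp := set1.foldl (fun d x => d.insert x true) PySem.Dict.empty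
    let res := set2.foldl (fun r x => if temp.contains x then r ++ [x] else r) ([] : List Int)
    PySem.Set.ofList res

def max_peresech_size (sets : List (List Int)) : Int :=
  (PySem.List.pyRange 0 (sets.length : Int) 1).foldl (fun mx i =>
    (PySem.List.pyRange (i + 1) (sets.length : Int) 1).foldl (fun mx j =>
      let temp := peresech (PySem.List.pyGetD sets i []) (PySem.List.pyGetD sets j [])
      if (PySem.Set.len temp : Int) > mx then (PySem.Set.len temp : Int) else mx) mx) 0

-- ===== PORT B =====
-- the `while rest: x = rest.pop(0); for y in rest: pairs.append((x, y))` loop of Source B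
def pairLoop (ps : List (Int × Int)) : List Int → List (Int × Int)
  | [] => ps
  | x :: rest => pairLoop (rest.foldl (fun ps y => ps ++ [(x, y)]) ps) rest

def max_peresech_size_alt (sets : List (List Int)) : Int :=
  -- occ.setdefault(x, []).append(i)  is  occ[x] = occ.get(x, []) + [i]  : Dict.modify
  let occ := (PySem.List.pyRange 0 (sets.length : Int) 1).foldl (fun d i =>
      (PySem.List.dedup (PySem.List.pyGetD sets i [])).foldl
        (fun (d : PySem.Dict Int (List Int)) x => d.modify x [] (fun l => l ++ [i])) d)
    PySem.Dict.empty
  let pairs := (PySem.Dict.values occ).foldl (fun ps idxs => pairLoop ps idxs) []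
  let counts := pairs.foldl (fun (c : PySem.Dict (Int × Int) Int) p => c.insert p (c.getD p 0 + 1)) PySem.Dict.empty
  (PySem.Dict.values counts).foldl (fun mx v => if v > mx then v else mx) 0

-- ===== PRECONDITION & SPEC =====
def Spec_max_peresech_size (sets : List (List Int)) (out : Int) : Prop := out = max_peresech_size_alt sets
instance (sets : List (List Int)) (out : Int) : Decidable (Spec_max_peresech_size sets out) := by unfold Spec_max_peresech_size; infer_instance

-- ===== CLAIM (what is proved, stated in full; the proofs are below) =====
def Claim_equal_max_peresech_size : Prop := ∀ (sets : List (List Int)), Dom_max_peresech_size sets → Spec_max_peresech_size sets (max_peresech_size sets)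

-- ===== LEMMAS AND PROOFS =====

-- proof-side abbreviations (A's i-th set, the inverted-index rows, the pair lists)
def pvS (sets : List (List Int)) (i : Int) : List Int := PySem.List.pyGetD sets i []

def pvRow (sets : List (List Int)) (e : Int) : List Int :=
  (PySem.List.pyRange 0 (sets.length : Int) 1).filter (fun i => decide (e ∈ pvS sets i))

def pairsOf : List Int → List (Int × Int)
  | [] => []
  | x :: r => r.map (fun y => (x, y)) ++ pairsOf r

def pvL (sets : List (List Int)) : List (Int × Int) :=
  (PySem.List.pyRange 0 (sets.length : Int) 1).flatMap
    (fun i => (PySem.List.dedup (pvS sets i)).map (fun x => (x, i)))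

def pvK (sets : List (List Int)) : List Int := PySem.Set.ofList ((pvL sets).map Prod.fst)

def pvP (sets : List (List Int)) : List (Int × Int) :=
  (pvK sets).flatMap (fun e => pairsOf (pvRow sets e))

def pvPairs (sets : List (List Int)) : List (Int × Int) :=
  (PySem.List.pyRange 0 (sets.length : Int) 1).flatMap
    (fun i => (PySem.List.pyRange (i + 1) (sets.length : Int) 1).map (fun j => (i, j)))

def pvC (sets : List (List Int)) (i j : Int) : Int :=
  (PySem.Set.len (peresech (pvS sets i) (pvS sets j)) : Int)

lemma foldl_flatMap {α β γ : Type} (l : List α) (f : α → List β) (g : γ → β → γ) (init : γ) :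
    (l.flatMap f).foldl g init = l.foldl (fun a x => (f x).foldl g a) init := by
  induction l generalizing init with
  | nil => rfl
  | cons x t ih => simp [List.flatMap_cons, List.foldl_append, ih]

lemma foldl_max_of_map {α : Type} (l : List α) (f : α → Int) (init : Int) :
    l.foldl (fun mx x => if f x > mx then f x else mx) init = (l.map f).foldl max init := by
  induction l generalizing init with
  | nil => rfl
  | cons x t ih =>
    simp only [List.foldl_cons, List.map_cons, ih]
    congr 1
    by_cases h : f x > init <;> simp [h, max_def] <;> omega

lemma flatMap_congr_mem {α β : Type} {l : List α} {f g : α → List β}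
    (h : ∀ x ∈ l, f x = g x) : l.flatMap f = l.flatMap g := by
  induction l with
  | nil => rfl
  | cons x t ih =>
    simp only [List.flatMap_cons, h x (List.mem_cons_self), ih (fun y hy => h y (List.mem_cons_of_mem _ hy))]

lemma filter_beq_of_nodup (l : List Int) (h : l.Nodup) (e : Int) :
    l.filter (fun x => x == e) = if e ∈ l then [e] else [] := by
  induction l with
  | nil => simp
  | cons x t ih =>
    rcases List.nodup_cons.1 h with ⟨hx, ht⟩
    by_cases hxe : x = e
    · subst hxe
      simp [hx, ih ht]
    · simp [hxe, ih ht, Ne.symm hxe]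

lemma flatMap_ite_singleton {α : Type} (l : List α) (p : α → Bool) :
    l.flatMap (fun i => if p i then [i] else []) = l.filter p := by
  induction l with
  | nil => rfl
  | cons x t ih => by_cases h : p x <;> simp [List.flatMap_cons, h, ih]

lemma peresech_eq (s1 s2 : List Int) :
    peresech s1 s2 = PySem.Set.ofList (s2.filter (fun x => decide (x ∈ s1))) := by
  unfold peresech
  split
  · rename_i h
    rcases h with h | h <;> subst h <;> simp [PySem.Set.empty, PySem.Set.ofList]
  · rename_i h
    have hkeys : (s1.foldl (fun d x => (d : PySem.Dict Int Bool).insert x true) PySem.Dict.empty).keys = PySem.Set.ofList s1 := by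
      rw [show (fun (d : PySem.Dict Int Bool) x => d.insert x true) = (fun d x => d.insert x ((fun _ _ => true) d x)) from rfl]
      rw [PySem.Dict.keys_foldl_insert]
      simp [PySem.Set.ofList_eq_foldl, PySem.Set.update, PySem.Dict.empty]
    have hc : ∀ x : Int, (s1.foldl (fun d x => (d : PySem.Dict Int Bool).insert x true) PySem.Dict.empty).contains x = decide (x ∈ s1) := by
      intro x
      by_cases hx : x ∈ s1
      · simp [hx, (PySem.Dict.contains_iff_mem_keys _ x).2 (by rw [hkeys]; exact (PySem.Set.mem_ofList s1 x).2 hx)]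
      · simp only [hx, decide_false]
        by_contra hcon
        simp only [Bool.not_eq_false] at hcon
        exact hx ((PySem.Set.mem_ofList s1 x).1 (by rw [← hkeys]; exact (PySem.Dict.contains_iff_mem_keys _ x).1 hcon))
    simp only [hc]
    rw [show (fun (r : List Int) x => if decide (x ∈ s1) = true then r ++ [x] else r) = (fun r x => if (fun y => decide (y ∈ s1)) x = true then r ++ [(fun y => y) x] else r) from rfl]
    rw [PySem.List.foldl_append_if]
    simp

lemma A_eq (sets : List (List Int)) :
    max_peresech_size sets = ((pvPairs sets).map (fun p => pvC sets p.1 p.2)).foldl max 0 := by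
  unfold max_peresech_size pvPairs
  rw [List.map_flatMap, foldl_flatMap]
  apply PySem.List.foldl_congr_mem
  intro a i _
  rw [List.map_map]
  rw [show ((fun p => pvC sets p.1 p.2) ∘ fun j => (i, j)) = fun j => pvC sets i j from rfl]
  rw [← foldl_max_of_map]
  rfl

lemma pairLoop_eq (ps : List (Int × Int)) (l : List Int) : pairLoop ps l = ps ++ pairsOf l := by
  induction l generalizing ps with
  | nil => simp [pairLoop, pairsOf]
  | cons x r ih =>
    show pairLoop (r.foldl (fun ps y => ps ++ [(x, y)]) ps) r = _
    rw [PySem.List.foldl_append_singleton_eq_map (fun y => (x, y)) r ps, ih, pairsOf]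
    simp

lemma occ_eq (sets : List (List Int)) :
    ((PySem.List.pyRange 0 (sets.length : Int) 1).foldl (fun d i =>
      (PySem.List.dedup (PySem.List.pyGetD sets i [])).foldl
        (fun (d : PySem.Dict Int (List Int)) x => d.modify x [] (fun l => l ++ [i])) d)
      PySem.Dict.empty)
    = (pvL sets).foldl (fun d p => d.modify p.1 [] (fun l => l ++ [p.2])) PySem.Dict.empty := by
  rw [pvL, foldl_flatMap]
  apply PySem.List.foldl_congr_mem
  intro d i _
  rw [List.foldl_map]
  rfl

lemma occ_getD (sets : List (List Int)) (e : Int) :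
    (((PySem.List.pyRange 0 (sets.length : Int) 1).foldl (fun d i =>
      (PySem.List.dedup (PySem.List.pyGetD sets i [])).foldl
        (fun (d : PySem.Dict Int (List Int)) x => d.modify x [] (fun l => l ++ [i])) d)
      PySem.Dict.empty)).getD e [] = pvRow sets e := by
  rw [occ_eq, PySem.Dict.getD_foldl_modify_append]
  have hD : ∀ d0 : List Int, (PySem.Dict.empty : PySem.Dict Int (List Int)).getD e d0 = d0 := by
    intro d0; rfl
  rw [hD, List.nil_append, pvRow, pvL]
  rw [List.filter_flatMap, List.map_flatMap]
  rw [← flatMap_ite_singleton (PySem.List.pyRange 0 (sets.length : Int) 1) (fun i => decide (e ∈ pvS sets i))]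
  apply flatMap_congr_mem
  intro i hi
  rw [List.filter_map]
  rw [show ((fun p => p.1 == e) ∘ fun x => (x, (i:Int))) = (fun x => x == e) from rfl]
  rw [filter_beq_of_nodup _ (PySem.List.nodup_dedup _) e]
  by_cases h : e ∈ pvS sets i
  · simp [h]
  · simp [h]

lemma occ_keys (sets : List (List Int)) :
    (((PySem.List.pyRange 0 (sets.length : Int) 1).foldl (fun d i =>
      (PySem.List.dedup (PySem.List.pyGetD sets i [])).foldl
        (fun (d : PySem.Dict Int (List Int)) x => d.modify x [] (fun l => l ++ [i])) d)
      PySem.Dict.empty)).keys = pvK sets := by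
  rw [occ_eq]
  rw [show (fun (d : PySem.Dict Int (List Int)) (p : Int × Int) => d.modify p.1 [] (fun l => l ++ [p.2]))
      = (fun d p => d.modify (Prod.fst p) [] ((fun _ p l => l ++ [p.2]) d p)) from rfl]
  rw [PySem.Dict.keys_foldl_modify_key]
  simp [pvK, PySem.Set.ofList_eq_foldl, PySem.Set.update, PySem.Dict.empty, PySem.Dict.keys]

lemma mem_K (sets : List (List Int)) (e : Int) :
    e ∈ pvK sets ↔ ∃ i : Int, (0 ≤ i ∧ i < (sets.length : Int)) ∧ e ∈ pvS sets i := by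
  rw [pvK, PySem.Set.mem_ofList]
  simp [pvL, PySem.List.mem_pyRange_one]

lemma values_eq_map_getD {κ ν : Type} [BEq κ] [LawfulBEq κ] (d : PySem.Dict κ ν) (d0 : ν)
    (h : d.keys.Nodup) : d.values = d.keys.map (fun k => d.getD k d0) := by
  have h1 : d.values = d.items.map (fun p => p.2) := rfl
  have h2 : d.keys = d.items.map (fun p => p.1) := rfl
  rw [h1, h2, List.map_map]
  apply List.map_congr_left
  intro p hp
  exact (PySem.Dict.getD_of_mem_items d (by simpa using hp) h d0).symm

lemma B_eq (sets : List (List Int)) :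
    max_peresech_size_alt sets
      = ((PySem.Set.ofList (pvP sets)).map (fun k => ((pvP sets).count k : Int))).foldl max 0 := by
  unfold max_peresech_size_alt
  show List.foldl (fun mx v => if v > mx then v else mx) 0
      (PySem.Dict.values (List.foldl (fun (c : PySem.Dict (Int × Int) Int) p => c.insert p (c.getD p 0 + 1)) PySem.Dict.empty
        (List.foldl (fun ps idxs => pairLoop ps idxs) []
          (PySem.Dict.values (List.foldl (fun d i => List.foldl (fun (d : PySem.Dict Int (List Int)) x => d.modify x [] fun l => l ++ [i]) d
              (PySem.List.dedup (PySem.List.pyGetD sets i []))) PySem.Dict.empty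
            (PySem.List.pyRange 0 (sets.length : Int) 1)))))) = _
  have hnodup : (((PySem.List.pyRange 0 (sets.length : Int) 1).foldl (fun d i =>
      (PySem.List.dedup (PySem.List.pyGetD sets i [])).foldl
        (fun (d : PySem.Dict Int (List Int)) x => d.modify x [] (fun l => l ++ [i])) d)
      PySem.Dict.empty)).keys.Nodup := by
    rw [occ_keys]; exact PySem.Set.nodup_ofList _
  rw [values_eq_map_getD _ [] hnodup, occ_keys]
  have hvals : (pvK sets).map (fun k =>
      (((PySem.List.pyRange 0 (sets.length : Int) 1).foldl (fun d i =>
      (PySem.List.dedup (PySem.List.pyGetD sets i [])).foldl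
        (fun (d : PySem.Dict Int (List Int)) x => d.modify x [] (fun l => l ++ [i])) d)
      PySem.Dict.empty)).getD k []) = (pvK sets).map (fun e => pvRow sets e) := by
    apply List.map_congr_left
    intro e _
    exact occ_getD sets e
  rw [hvals]
  rw [show (fun (ps : List (Int × Int)) (idxs : List Int) => pairLoop ps idxs)
      = (fun ps idxs => ps ++ pairsOf idxs) from funext fun ps => funext fun idxs => pairLoop_eq ps idxs]
  rw [PySem.List.foldl_append_eq_flatMap, List.nil_append, List.flatMap_map]
  rw [show (pvK sets).flatMap (fun a => pairsOf (pvRow sets a)) = pvP sets from rfl]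
  rw [PySem.Dict.foldl_insert_getD_add_one_eq_counter]
  have hvc : (PySem.Dict.counter (pvP sets)).values
      = (PySem.Set.ofList (pvP sets)).map (fun k => ((pvP sets).count k : Int)) := by
    have h1 : (PySem.Dict.counter (pvP sets)).values = (PySem.Dict.counter (pvP sets)).items.map (fun p => p.2) := rfl
    rw [h1, PySem.Dict.items_counter, List.map_map]
    rfl
  rw [hvc, foldl_max_of_map _ (fun v => v) 0, List.map_id']

lemma pyRange_pairwise (n : Nat) : (PySem.List.pyRange 0 (n : Int) 1).Pairwise (· < ·) := by
  rw [PySem.List.pyRange_zero_natCast]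
  exact (List.pairwise_lt_range).map _ (fun a b h => by exact_mod_cast h)

lemma row_pairwise (sets : List (List Int)) (e : Int) : (pvRow sets e).Pairwise (· < ·) := by
  exact List.Pairwise.sublist List.filter_sublist (pyRange_pairwise sets.length)

lemma mem_row (sets : List (List Int)) (e i : Int) :
    i ∈ pvRow sets e ↔ (0 ≤ i ∧ i < (sets.length : Int)) ∧ e ∈ pvS sets i := by
  simp [pvRow, List.mem_filter, PySem.List.mem_pyRange_one, and_comm]

lemma mem_pairsOf (l : List Int) (p : Int × Int) (hp : p ∈ pairsOf l) (hl : l.Pairwise (· < ·)) :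
    p.1 ∈ l ∧ p.2 ∈ l ∧ p.1 < p.2 := by
  induction l with
  | nil => simp [pairsOf] at hp
  | cons x r ih =>
    rcases List.pairwise_cons.1 hl with ⟨hx, hr⟩
    rw [pairsOf, List.mem_append] at hp
    rcases hp with hp | hp
    · rcases List.mem_map.1 hp with ⟨y, hy, rfl⟩
      exact ⟨List.mem_cons_self, List.mem_cons_of_mem _ hy, hx y hy⟩
    · rcases ih hp hr with ⟨h1, h2, h3⟩
      exact ⟨List.mem_cons_of_mem _ h1, List.mem_cons_of_mem _ h2, h3⟩

lemma count_pairsOf (l : List Int) (hl : l.Pairwise (· < ·)) (i j : Int) (hij : i < j) :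
    (pairsOf l).count (i, j) = if i ∈ l ∧ j ∈ l then 1 else 0 := by
  induction l with
  | nil => simp [pairsOf]
  | cons x r ih =>
    rcases List.pairwise_cons.1 hl with ⟨hx, hr⟩
    rw [pairsOf, List.count_append, ih hr]
    have hmap : (r.map (fun y => (x, y))).count (i, j) = if x = i ∧ j ∈ r then 1 else 0 := by
      by_cases hxi : x = i
      · subst hxi
        rw [show ((x, j) : Int × Int) = (fun y => (x, y)) j from rfl,
          List.count_map_of_injective r (fun y => (x, y)) (fun a b hab => by simpa using hab)]
        have hnd : r.Nodup := hr.imp (fun h => ne_of_lt h)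
        by_cases hjr : j ∈ r
        · simp [hjr, List.count_eq_one_of_mem hnd hjr]
        · simp [hjr, List.count_eq_zero_of_not_mem hjr]
      · have hz : ((i, j) : Int × Int) ∉ r.map (fun y => (x, y)) := by
          intro hmem
          rcases List.mem_map.1 hmem with ⟨y, _, hy⟩
          exact hxi (congrArg Prod.fst hy)
        simp [List.count_eq_zero_of_not_mem hz, hxi]
    rw [hmap]
    by_cases h1 : x = i
    · subst h1
      have hir : x ∉ r := fun h => lt_irrefl x (hx x h)
      by_cases h2 : j ∈ r
      · simp [h2, hir, List.mem_cons]
      · have hjx : j ≠ x := by omega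
        simp [h2, hir, hjx, List.mem_cons]
    · have h1' : i ≠ x := fun h => h1 h.symm
      by_cases h2 : j = x
      · have hir : i ∉ r := fun h => by have := hx i h; omega
        simp [List.mem_cons, h1, h1', hir]
      · simp [List.mem_cons, h1, h1', h2]

lemma count_flatMap {α β : Type} [BEq β] (l : List α) (f : α → List β) (b : β) :
    (l.flatMap f).count b = (l.map (fun x => (f x).count b)).sum := by
  induction l with
  | nil => rfl
  | cons x t ih => simp [List.flatMap_cons, List.count_append, ih]

lemma sum_ite_one_zero {α : Type} (l : List α) (p : α → Prop) [DecidablePred p] :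
    (l.map (fun x => if p x then 1 else 0)).sum = (l.filter (fun x => decide (p x))).length := by
  induction l with
  | nil => rfl
  | cons x t ih => by_cases h : p x <;> simp [h, ih, Nat.add_comm]

lemma count_P (sets : List (List Int)) (i j : Int) (h0 : 0 ≤ i) (hij : i < j)
    (hj : j < (sets.length : Int)) :
    ((pvP sets).count (i, j) : Int) = pvC sets i j := by
  have hcnt : (pvP sets).count (i, j)
      = ((pvK sets).filter (fun e => decide (e ∈ pvS sets i ∧ e ∈ pvS sets j))).length := by
    rw [pvP, count_flatMap]
    have hterm : ∀ e ∈ pvK sets, (pairsOf (pvRow sets e)).count (i, j)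
        = if e ∈ pvS sets i ∧ e ∈ pvS sets j then 1 else 0 := by
      intro e _
      rw [count_pairsOf _ (row_pairwise sets e) i j hij]
      congr 1
      simp only [mem_row, eq_iff_iff]
      constructor
      · rintro ⟨⟨_, hi⟩, ⟨_, hjm⟩⟩; exact ⟨hi, hjm⟩
      · rintro ⟨hi, hjm⟩; exact ⟨⟨⟨h0, by omega⟩, hi⟩, ⟨⟨by omega, hj⟩, hjm⟩⟩
    rw [List.map_congr_left hterm, sum_ite_one_zero]
  rw [hcnt, pvC, peresech_eq]
  have hlen : ∀ s : PySem.Set Int, PySem.Set.len s = (s.length : Int) := fun _ => rfl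
  rw [hlen]
  congr 1
  apply List.Perm.length_eq
  have hKnd : (pvK sets).Nodup := by rw [pvK]; exact PySem.Set.nodup_ofList _
  rw [List.perm_ext_iff_of_nodup (hKnd.filter _) (PySem.Set.nodup_ofList _)]
  intro e
  rw [List.mem_filter, PySem.Set.mem_ofList, List.mem_filter]
  constructor
  · rintro ⟨_, hp⟩
    have hp' := of_decide_eq_true hp
    exact ⟨hp'.2, by simpa using hp'.1⟩
  · rintro ⟨hjm, hi⟩
    have hi' : e ∈ pvS sets i := by simpa using hi
    exact ⟨(mem_K sets e).2 ⟨j, ⟨by omega, hj⟩, hjm⟩, by simp [hi', hjm]⟩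

lemma mem_P (sets : List (List Int)) (p : Int × Int) (hp : p ∈ pvP sets) :
    0 ≤ p.1 ∧ p.1 < p.2 ∧ p.2 < (sets.length : Int) := by
  rcases List.mem_flatMap.1 hp with ⟨e, _, hpe⟩
  rcases mem_pairsOf _ _ hpe (row_pairwise sets e) with ⟨h1, h2, h3⟩
  rw [mem_row] at h1 h2
  exact ⟨h1.1.1, h3, h2.1.2⟩

lemma mem_pvPairs (sets : List (List Int)) (p : Int × Int) :
    p ∈ pvPairs sets ↔ 0 ≤ p.1 ∧ p.1 < p.2 ∧ p.2 < (sets.length : Int) := by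
  rcases p with ⟨i, j⟩
  simp [pvPairs, List.mem_flatMap, PySem.List.mem_pyRange_one]
  omega

lemma foldl_max_zero_eq (l1 l2 : List Int)
    (h1 : ∀ x ∈ l1, x ≤ l2.foldl max 0) (h2 : ∀ x ∈ l2, x ≤ l1.foldl max 0) :
    l1.foldl max 0 = l2.foldl max 0 := by
  apply le_antisymm
  · rcases PySem.List.foldl_max_mem l1 0 with h | h
    · rw [h]; exact (PySem.List.le_foldl_max l2 0).1
    · exact h1 _ h
  · rcases PySem.List.foldl_max_mem l2 0 with h | h
    · rw [h]; exact (PySem.List.le_foldl_max l1 0).1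
    · exact h2 _ h

-- ===== VERDICT (by name: the statement is the Claim_ definition above) =====
theorem max_peresech_size_spec : Claim_equal_max_peresech_size := by
  intro sets _
  unfold Spec_max_peresech_size
  rw [A_eq, B_eq]
  apply foldl_max_zero_eq
  · -- every value of A's pair scan is bounded by B's fold
    intro x hx
    rcases List.mem_map.1 hx with ⟨p, hp, rfl⟩
    rcases (mem_pvPairs sets p).1 hp with ⟨h0, hij, hj⟩
    rw [← count_P sets p.1 p.2 h0 hij hj]
    by_cases hc : (pvP sets).count (p.1, p.2) = 0
    · rw [hc]
      exact le_trans (by norm_num) ((PySem.List.le_foldl_max _ 0).1)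
    · apply (PySem.List.le_foldl_max _ 0).2
      apply List.mem_map.2
      refine ⟨(p.1, p.2), (PySem.Set.mem_ofList _ _).2 (List.count_pos_iff.1 (Nat.pos_of_ne_zero hc)), rfl⟩
  · -- every counter value of B is bounded by A's fold
    intro x hx
    rcases List.mem_map.1 hx with ⟨k, hk, rfl⟩
    rcases mem_P sets k ((PySem.Set.mem_ofList _ _).1 hk) with ⟨h0, hij, hj⟩
    have hcp : ((pvP sets).count k : Int) = pvC sets k.1 k.2 := by
      rw [show k = (k.1, k.2) from rfl]
      exact count_P sets k.1 k.2 h0 hij hj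
    rw [hcp]
    apply (PySem.List.le_foldl_max _ 0).2
    exact List.mem_map.2 ⟨(k.1, k.2), (mem_pvPairs sets (k.1, k.2)).2 ⟨h0, hij, hj⟩, rfl⟩
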